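-- pv_equiv track=rewrite | github.com/suchunkang0822/Go_remote | Deliverables/9/9.1/TournamentAdmin.py | calculate_rr
-- ===== SOURCE A (Python) =====
-- def calculate_rr(map, cheaters):
--     score_map = {}
--     for key in map:
--         score_map[key] = len(map[key])
--
--     rank_map = {}
--     for key in score_map:
--         score = score_map[key]
--         if score in rank_map:
--             rank_map[score].append(key)
--         else:
--             rank_map[score] = [key]
--
--     rank_map[-1] = cheaters
--     rankings = {}
--     i = 1
--     for ind in sorted(rank_map)[::-1]:
--         rankings[i] = rank_map[ind]
--         i+=1
--
--
--     return rankings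
-- ===== SOURCE B (Python) =====
-- def calculate_rr(map, cheaters):
--     scores = sorted({len(v) for v in map.values()}, reverse=True)
--     groups = [[k for k in map if len(map[k]) == s] for s in scores]
--     groups.append(cheaters)
--     return {i: g for i, g in enumerate(groups, 1)}
-- ===== Notes on version B (the rewrite author's own statement) =====
-- stated objective: idiomatic
-- what changed: B replaces A's three incrementally-built dicts (score_map, rank_map buckets, counter-driven rankings dict) with a direct pipeline: sort the distinct bucket sizes descending, build each rank's group by a comprehension filter, and enumerate the groups (cheaters last).
import Mathlib
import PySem

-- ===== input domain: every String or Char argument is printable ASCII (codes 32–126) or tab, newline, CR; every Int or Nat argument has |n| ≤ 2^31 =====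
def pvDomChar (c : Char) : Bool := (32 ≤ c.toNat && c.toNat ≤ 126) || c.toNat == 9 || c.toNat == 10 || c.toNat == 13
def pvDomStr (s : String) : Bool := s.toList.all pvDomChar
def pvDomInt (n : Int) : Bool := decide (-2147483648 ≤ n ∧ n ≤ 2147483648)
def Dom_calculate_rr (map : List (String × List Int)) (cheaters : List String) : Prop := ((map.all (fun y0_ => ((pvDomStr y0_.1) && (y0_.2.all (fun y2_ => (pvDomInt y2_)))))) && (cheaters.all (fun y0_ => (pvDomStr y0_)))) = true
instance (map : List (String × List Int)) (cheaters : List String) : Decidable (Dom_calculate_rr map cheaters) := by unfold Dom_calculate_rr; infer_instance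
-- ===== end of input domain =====

-- B replaces A's dict-accumulation (score_map / rank_map / counter loop) with sort-distinct-scores +
-- per-score filter + enumerate — an idiomatic re-decomposition, same results (return value; no mutation).

-- ===== PORT A =====
def calculate_rr (map : List (String × List Int)) (cheaters : List String) : List (Int × List String) :=
  let m : PySem.Dict String (List Int) := PySem.Dict.ofList map
  -- score_map = {};  for key in map: score_map[key] = len(map[key])
  -- (key comes from map itself, so map[key] never raises; getD with [] is exact here)
  let scoreMap : PySem.Dict String Int :=
    m.keys.foldl (fun d key => d.insert key ((m.getD key []).length : Int)) PySem.Dict.empty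
  -- rank_map = {};  for key in score_map: append / start a bucket
  -- (score_map[key] never raises: key iterates score_map's own keys)
  let rankMap : PySem.Dict Int (List String) :=
    scoreMap.keys.foldl (fun d key =>
      let score := scoreMap.getD key 0
      if d.contains score then d.modify score [] (fun l => l ++ [key])
      else d.insert score [key]) PySem.Dict.empty
  -- rank_map[-1] = cheaters
  let rankMap2 := rankMap.insert (-1) cheaters
  -- sorted(rank_map)[::-1]
  let inds := (PySem.List.slice? (PySem.List.sorted rankMap2.keys (fun x => x)) none none (-1)).getD []
  -- rankings = {}; i = 1; for ind in …: rankings[i] = rank_map[ind]; i += 1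
  -- (rank_map[ind] never raises: ind iterates rank_map's own keys)
  let rankings : PySem.Dict Int (List String) × Int :=
    inds.foldl (fun p ind => (p.1.insert p.2 (rankMap2.getD ind []), p.2 + 1)) (PySem.Dict.empty, 1)
  rankings.1.items

-- ===== PORT B =====
def calculate_rr_alt (map : List (String × List Int)) (cheaters : List String) : List (Int × List String) :=
  let m : PySem.Dict String (List Int) := PySem.Dict.ofList map
  -- scores = sorted({len(v) for v in map.values()}, reverse=True)
  let scores : List Int :=
    PySem.List.sorted (PySem.Set.ofList (m.values.map (fun v => (v.length : Int)))) (fun x => x) true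
  -- groups = [[k for k in map if len(map[k]) == s] for s in scores]; groups.append(cheaters)
  let groups : List (List String) :=
    scores.map (fun s => m.keys.filter (fun k => ((m.getD k []).length : Int) == s)) ++ [cheaters]
  -- {i: g for i, g in enumerate(groups, 1)}
  PySem.List.enumerate groups 1

-- ===== PRECONDITION & SPEC =====
def Spec_calculate_rr (map : List (String × List Int)) (cheaters : List String) (out : List (Int × List String)) : Prop := out = calculate_rr_alt map cheaters
instance (map : List (String × List Int)) (cheaters : List String) (out : List (Int × List String)) : Decidable (Spec_calculate_rr map cheaters out) := by unfold Spec_calculate_rr; infer_instance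

-- ===== CLAIM (what is proved, stated in full; the proofs are below) =====
def Claim_equal_calculate_rr : Prop := ∀ (map : List (String × List Int)) (cheaters : List String), Dom_calculate_rr map cheaters → Spec_calculate_rr map cheaters (calculate_rr map cheaters)

-- ===== LEMMAS AND PROOFS =====

-- enumerate commutes with map
lemma pv_enumerate_map {α β : Type} (g : α → β) (xs : List α) (i : Int) :
    PySem.List.enumerate (xs.map g) i = (PySem.List.enumerate xs i).map (fun p => (p.1, g p.2)) := by
  induction xs generalizing i with
  | nil => simp [PySem.List.enumerate_nil]
  | cons x xs ih => simp [PySem.List.enumerate_cons, ih]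

-- the lookup of the bucket-building loop of A: buckets collect their keys in order
lemma pv_getD_fold_modify (sc : String → Int) (l : List String)
    (d : PySem.Dict Int (List String)) (s : Int) :
    (l.foldl (fun d k => d.modify (sc k) [] (fun v => v ++ [k])) d).getD s []
      = d.getD s [] ++ l.filter (fun k => sc k == s) := by
  induction l generalizing d with
  | nil => simp
  | cons x xs ih =>
    simp only [List.foldl_cons, ih, List.filter_cons]
    rw [PySem.Dict.getD_modify]
    by_cases h : s = sc x
    · simp [h, List.append_assoc]
    · simp [h, Ne.symm h]

-- the keys of the bucket-building loop of A: first occurrences of the scores, in order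
lemma pv_keys_fold_modify (sc : String → Int) (l : List String)
    (d : PySem.Dict Int (List String)) :
    (l.foldl (fun d k => d.modify (sc k) [] (fun v => v ++ [k])) d).keys
      = PySem.Set.update d.keys (l.map sc) := by
  induction l generalizing d with
  | nil => simp [PySem.Set.update]
  | cons x xs ih =>
    simp only [List.foldl_cons, List.map_cons, ih]
    have hk : (d.modify (sc x) [] (fun v => v ++ [x])).keys = PySem.Set.add d.keys (sc x) := by
      rw [PySem.Dict.keys_modify]
      by_cases h : d.contains (sc x)
      · rw [PySem.Dict.keys_insert_of_contains d _ h]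
        have hm : sc x ∈ d.keys := by
          rw [PySem.Dict.contains_eq_decide_mem_keys] at h
          exact of_decide_eq_true h
        simp only [PySem.Set.add, PySem.Set.contains, List.contains_eq_mem, decide_eq_true_eq,
          if_pos hm]
      · rw [PySem.Dict.keys_insert_of_not_contains d _ (by simpa using h)]
        have hm : ¬ sc x ∈ d.keys := by
          rw [PySem.Dict.contains_eq_decide_mem_keys] at h
          simpa using h
        simp only [PySem.Set.add, PySem.Set.contains, List.contains_eq_mem, decide_eq_true_eq,
          if_neg hm]
    rw [hk]
    rfl

-- A's final loop: successive fresh integer keys simply enumerate the buckets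
lemma pv_fold_rankings (g : Int → List String) (xs : List Int) :
    ∀ (d : PySem.Dict Int (List String)) (i : Int), (∀ k ∈ d.keys, k < i) →
      (xs.foldl (fun p ind => (p.1.insert p.2 (g ind), p.2 + 1)) (d, i)).1.items
        = d.items ++ (PySem.List.enumerate xs i).map (fun p => (p.1, g p.2)) := by
  induction xs with
  | nil => intro d i _; simp [PySem.List.enumerate_nil]
  | cons x xs ih =>
    intro d i h
    have hc : d.contains i = false := by
      rw [PySem.Dict.contains_eq_decide_mem_keys]
      simp only [decide_eq_false_iff_not]
      intro hm; exact absurd (h i hm) (lt_irrefl i)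
    have hit := PySem.Dict.items_insert_of_not_contains d (g x) hc
    have hkeys : (d.insert i (g x)).keys = d.keys ++ [i] :=
      PySem.Dict.keys_insert_of_not_contains d (g x) hc
    simp only [List.foldl_cons]
    rw [ih (d.insert i (g x)) (i + 1) ?_]
    · rw [hit, PySem.List.enumerate_cons]
      simp
    · intro k hk
      rw [hkeys] at hk
      rcases List.mem_append.1 hk with h1 | h1
      · exact lt_trans (h k h1) (by omega)
      · simp only [List.mem_singleton] at h1; omega

-- the heart of the equivalence
lemma pv_main (map : List (String × List Int)) (cheaters : List String) :
    calculate_rr map cheaters = calculate_rr_alt map cheaters := by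
  simp only [calculate_rr, calculate_rr_alt]
  have hnd : (PySem.Dict.ofList map).keys.Nodup := PySem.Dict.nodup_keys_ofList map
  set m := PySem.Dict.ofList map with hm
  set sc : String → Int := fun k => ((m.getD k []).length : Int) with hsc
  -- stage 1: score_map lists every key of m with its score, in order
  set scoreMap : PySem.Dict String Int :=
    m.keys.foldl (fun d key => d.insert key ((m.getD key []).length : Int)) PySem.Dict.empty
    with hsmdef
  have hsm : scoreMap.items = m.keys.map (fun k => (k, sc k)) := by
    have := PySem.Dict.items_foldl_insert_fresh m.keys (fun a => a) sc PySem.Dict.empty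
      (fun a _ => PySem.Dict.contains_empty a) (by simpa using hnd)
    simpa [hsmdef, hsc] using this
  have hsmkeys : scoreMap.keys = m.keys := by
    simp [PySem.Dict.keys, hsm]
  have hsmget : ∀ k ∈ m.keys, scoreMap.getD k 0 = sc k := by
    intro k hk
    exact PySem.Dict.getD_of_mem_items scoreMap
      (by rw [hsm]; exact List.mem_map.2 ⟨k, hk, rfl⟩) (by rw [hsmkeys]; exact hnd) 0
  -- stage 2: rank_map groups the keys by score
  rw [hsmkeys]
  have hrstep : m.keys.foldl (fun d key =>
        if d.contains (scoreMap.getD key 0)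
        then d.modify (scoreMap.getD key 0) [] (fun l => l ++ [key])
        else d.insert (scoreMap.getD key 0) [key]) PySem.Dict.empty
      = m.keys.foldl (fun d k => d.modify (sc k) [] (fun v => v ++ [k])) PySem.Dict.empty := by
    apply PySem.List.foldl_congr_mem
    intro d key hk
    rw [hsmget key hk]
    by_cases hc : d.contains (sc key) = true
    · rw [if_pos hc]
    · rw [if_neg hc]
      simp only [PySem.Dict.modify,
        PySem.Dict.getD_of_not_contains d _ (by simpa using hc), List.nil_append]
  rw [hrstep]
  set rankMap : PySem.Dict Int (List String) :=
    m.keys.foldl (fun d k => d.modify (sc k) [] (fun v => v ++ [k])) PySem.Dict.empty with hrm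
  have hrget : ∀ s : Int, rankMap.getD s [] = m.keys.filter (fun k => sc k == s) := by
    intro s
    rw [hrm, pv_getD_fold_modify]
    simp
  have hrkeys : rankMap.keys = PySem.Set.ofList (m.keys.map sc) := by
    rw [hrm, pv_keys_fold_modify]
    rw [PySem.Dict.keys_empty, PySem.Set.update_nil_left]
  have hnonneg : ∀ s ∈ PySem.Set.ofList (m.keys.map sc), (0 : Int) ≤ s := by
    intro s hs
    rcases List.mem_map.1 ((PySem.Set.mem_ofList _ _).1 hs) with ⟨k, _, hk⟩
    rw [hsc] at hk
    simp only [← hk]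
    positivity
  have hcont : rankMap.contains (-1) = false := by
    rw [PySem.Dict.contains_eq_decide_mem_keys, hrkeys]
    simp only [decide_eq_false_iff_not]
    intro hmem
    have := hnonneg _ hmem
    omega
  have hk2 : (rankMap.insert (-1) cheaters).keys = PySem.Set.ofList (m.keys.map sc) ++ [-1] := by
    rw [PySem.Dict.keys_insert_of_not_contains rankMap cheaters hcont, hrkeys]
  have hg1 : (rankMap.insert (-1) cheaters).getD (-1) [] = cheaters :=
    PySem.Dict.getD_insert_self rankMap (-1) cheaters []
  have hg2 : ∀ s : Int, s ≠ -1 →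
      (rankMap.insert (-1) cheaters).getD s [] = m.keys.filter (fun k => sc k == s) := by
    intro s hne
    rw [PySem.Dict.getD_insert_of_ne rankMap cheaters [] hne, hrget]
  set M := PySem.List.sorted (PySem.Set.ofList (m.keys.map sc)) (fun x => x) with hMdef
  have hsort : PySem.List.sorted (PySem.Set.ofList (m.keys.map sc) ++ [-1]) (fun x => x)
      = -1 :: M := by
    apply PySem.List.sorted_eq_of_perm_of_pairwise_lt
    · exact ((PySem.List.sorted_perm _ _ false).cons (-1)).trans
        (List.perm_append_singleton (-1) _).symm
    · rw [List.pairwise_cons]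
      refine ⟨fun b hb => ?_, PySem.List.sorted_ofList_pairwise_lt (m.keys.map sc)⟩
      have hbS : b ∈ PySem.Set.ofList (m.keys.map sc) := (PySem.List.mem_sorted _ _ _ _).1 hb
      have := hnonneg b hbS
      omega
  have hsd : PySem.List.sorted (PySem.Set.ofList (m.keys.map sc)) (fun x => x) true
      = M.reverse := by
    apply PySem.List.sorted_rev_eq_of_perm_of_pairwise_gt
    · exact M.reverse_perm.trans (PySem.List.sorted_perm _ _ false)
    · exact List.pairwise_reverse.2 (PySem.List.sorted_ofList_pairwise_lt (m.keys.map sc))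
  have hval : m.values.map (fun v => (v.length : Int)) = m.keys.map sc := by
    rw [PySem.Dict.values_eq_map_keys m hnd ([] : List Int), hsc]
    simp [List.map_map]
  rw [hval, hsd, hk2, hsort, PySem.List.slice?_none_none_neg_one, Option.getD_some,
    List.reverse_cons]
  rw [pv_fold_rankings (fun ind => (rankMap.insert (-1) cheaters).getD ind [])
    (M.reverse ++ [-1]) PySem.Dict.empty 1 (by rw [PySem.Dict.keys_empty]; intro k hk; cases hk)]
  have hlist : M.reverse.map
        (fun s => m.keys.filter (fun k => ((m.getD k []).length : Int) == s)) ++ [cheaters]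
      = (M.reverse ++ [-1]).map (fun ind => (rankMap.insert (-1) cheaters).getD ind []) := by
    rw [List.map_append]
    congr 1
    · refine (List.map_congr_left fun s hs => ?_).symm
      have hsS : s ∈ PySem.Set.ofList (m.keys.map sc) :=
        (PySem.List.mem_sorted _ _ _ _).1 (List.mem_reverse.1 hs)
      have hge := hnonneg s hsS
      rw [hg2 s (by omega), hsc]
    · simp [hg1]
  rw [hlist, pv_enumerate_map]
  simp [PySem.Dict.empty]

-- ===== VERDICT (by name: the statement is the Claim_ definition above) =====
theorem calculate_rr_spec : Claim_equal_calculate_rr := by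
  unfold Claim_equal_calculate_rr Spec_calculate_rr
  intro map cheaters _
  exact pv_main map cheaters
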